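-- pv_equiv track=rewrite | github.com/MrLuohao/feign-automaticall-generated-skills | scripts/api_contract/provider.py | _is_scalar_type
-- ===== SOURCE A (Python) =====
-- def _is_scalar_type(type_name: str) -> bool:
--     primitives = {
--         "String",
--         "Long",
--         "Integer",
--         "Boolean",
--         "Double",
--         "Float",
--         "BigDecimal",
--         "Object",
--         "Date",
--         "LocalDate",
--         "LocalDateTime",
--         "int",
--         "long",
--         "boolean",
--         "double",
--         "float",
--         "byte[]",
--         "void",
--     }
--     normalized = type_name.replace(" ", "")
--     if normalized in primitives:
--         return True
--     if "<" in normalized and ">" in normalized: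
--         raw_type = _raw_generic_type(normalized)
--         generic_args = _generic_arguments(normalized)
--         return raw_type in {"List", "Set", "Collection", "Optional"} and all(_is_scalar_type(arg) for arg in generic_args)
--     return False
--
-- def _raw_generic_type(type_name: str) -> str:
--     return type_name.split("<", 1)[0]
--
-- def _generic_arguments(type_name: str) -> list[str]:
--     start = type_name.find("<")
--     end = type_name.rfind(">")
--     if start == -1 or end == -1 or end <= start:
--         return []
--     body = type_name[start + 1 : end]
--     args: list[str] = []
--     depth = 0
--     current: list[str] = []
--     for char in body:
--         if char == "," and depth == 0:
--             value = "".join(current).strip()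
--             if value:
--                 args.append(value)
--             current = []
--             continue
--         if char == "<":
--             depth += 1
--         elif char == ">":
--             depth -= 1
--         current.append(char)
--     value = "".join(current).strip()
--     if value:
--         args.append(value)
--     return args
-- ===== SOURCE B (Python) =====
-- def _is_scalar_type(type_name: str) -> bool:
--     primitives = {
--         "String", "Long", "Integer", "Boolean", "Double", "Float",
--         "BigDecimal", "Object", "Date", "LocalDate", "LocalDateTime",
--         "int", "long", "boolean", "double", "float", "byte[]", "void",
--     }
--     containers = {"List", "Set", "Collection", "Optional"}
--     # Iterative worklist instead of recursion: normalize once, then pop each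
--     # pending type; a generic container pushes its top-level arguments.
--     pending = [type_name.replace(" ", "")]
--     while pending:
--         t = pending.pop()
--         if t in primitives:
--             continue
--         start = t.find("<")
--         end = t.rfind(">")
--         if start == -1 or end == -1 or t[:start] not in containers:
--             return False
--         depth = 0
--         part = ""
--         for c in t[start + 1 : end]:
--             if c == "," and depth == 0:
--                 if part.strip():
--                     pending.append(part.strip())
--                 part = ""
--                 continue
--             if c == "<":
--                 depth += 1
--             elif c == ">":
--                 depth -= 1
--             part += c
--         if part.strip():
--             pending.append(part.strip())
--     return True
-- ===== Notes on version B (the rewrite author's own statement) =====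
-- stated objective: alternative
-- what changed: A's recursive predicate (which re-normalizes the string and rebuilds the primitive/container sets on every recursive call) is replaced by a single iterative worklist loop: the string is normalized once and each generic container pushes its top-level arguments onto an explicit pending stack.
import Mathlib
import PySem

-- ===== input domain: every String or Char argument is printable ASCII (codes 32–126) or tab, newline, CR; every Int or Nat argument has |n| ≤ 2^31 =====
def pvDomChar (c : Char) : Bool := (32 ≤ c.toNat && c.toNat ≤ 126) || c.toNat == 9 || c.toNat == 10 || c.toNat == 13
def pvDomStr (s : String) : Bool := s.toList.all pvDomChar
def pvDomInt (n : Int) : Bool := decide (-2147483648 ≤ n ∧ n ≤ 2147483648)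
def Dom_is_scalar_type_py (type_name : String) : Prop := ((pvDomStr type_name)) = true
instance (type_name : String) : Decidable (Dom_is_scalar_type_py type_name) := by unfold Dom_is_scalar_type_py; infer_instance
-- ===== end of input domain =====

-- B replaces A's recursion by a single iterative worklist that normalizes the string once
-- and validates pending generic arguments from an explicit stack (alternative decomposition).


-- the 'primitives' / container set literals of both Pythons (space-free ASCII names)
def pvPrimitives : List (List Char) :=
  ["String".toList, "Long".toList, "Integer".toList, "Boolean".toList, "Double".toList,
   "Float".toList, "BigDecimal".toList, "Object".toList, "Date".toList, "LocalDate".toList,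
   "LocalDateTime".toList, "int".toList, "long".toList, "boolean".toList, "double".toList,
   "float".toList, "byte[]".toList, "void".toList]

def pvContainers : List (List Char) :=
  ["List".toList, "Set".toList, "Collection".toList, "Optional".toList]

-- ===== PORT A =====

-- _raw_generic_type: type_name.split("<", 1)[0]  (split never returns [], so [0] is its head)
def pvRawGenericType (t : List Char) : List Char :=
  PySem.List.pyGetD (PySem.Chars.splitOnMax t ['<'] 1) 0 []

-- the body of _generic_arguments' for-loop, state = (depth, current, args)
def pvAStep (st : Int × List Char × List (List Char)) (c : Char) :
    Int × List Char × List (List Char) :=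
  if c = ',' ∧ st.1 = 0 then
    -- value = "".join(current).strip(); if value: args.append(value); current = []
    let value := PySem.Chars.strip st.2.1
    (st.1, [], if value = [] then st.2.2 else st.2.2 ++ [value])
  else
    let d := if c = '<' then st.1 + 1 else if c = '>' then st.1 - 1 else st.1
    (d, st.2.1 ++ [c], st.2.2)

def pvGenericArguments (t : List Char) : List (List Char) :=
  let start := PySem.Chars.find t ['<']
  let endI := PySem.Chars.rfind t ['>']
  if start = -1 ∨ endI = -1 ∨ endI ≤ start then []
  else
    let body := PySem.List.slice t (some (start + 1)) (some endI)
    let res := body.foldl pvAStep (0, [], [])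
    let value := PySem.Chars.strip res.2.1
    if value = [] then res.2.2 else res.2.2 ++ [value]

-- _is_scalar_type, with a fuel counter making the recursion structural; every generic
-- argument is strictly shorter than the normalized string, so fuel length+1 never runs
-- out (this is proved, not assumed: see pvAGo_fuel_irrel below).
def pvAGo : Nat → List Char → Bool
  | 0, _ => false
  | fuel + 1, s =>
    let normalized := PySem.Chars.replace s [' '] []
    if normalized ∈ pvPrimitives then true
    else if PySem.Chars.isIn ['<'] normalized && PySem.Chars.isIn ['>'] normalized then
      decide (pvRawGenericType normalized ∈ pvContainers) &&
        (pvGenericArguments normalized).all (pvAGo fuel)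
    else false

def is_scalar_type_py (type_name : String) : Bool :=
  pvAGo (type_name.toList.length + 1) type_name.toList

-- ===== PORT B =====

-- body of B's comma-splitting for-loop, state = (depth, part, pending);
-- B pushes each finished part straight onto the pending stack
def pvBStep (st : Int × List Char × List (List Char)) (c : Char) :
    Int × List Char × List (List Char) :=
  if c = ',' ∧ st.1 = 0 then
    let part := PySem.Chars.strip st.2.1
    (st.1, [], if part = [] then st.2.2 else part :: st.2.2)
  else
    let d := if c = '<' then st.1 + 1 else if c = '>' then st.1 - 1 else st.1
    (d, st.2.1 ++ [c], st.2.2)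

-- B's while-loop; the pending stack keeps its top at the list head (Python appends and
-- pops at the list's end — same stack discipline, same popping order).  Fuel length+2
-- never runs out: every iteration strictly shrinks the total stack size (proved, not
-- assumed: see pvBLoop_eq_all below).
def pvBLoop : Nat → List (List Char) → Bool
  | 0, _ => false
  | _ + 1, [] => true
  | fuel + 1, t :: rest =>
    if t ∈ pvPrimitives then pvBLoop fuel rest
    else
      let start := PySem.Chars.find t ['<']
      let endI := PySem.Chars.rfind t ['>']
      if start = -1 ∨ endI = -1 ∨ PySem.List.slice t none (some start) ∉ pvContainers then
        false
      else
        let res := (PySem.List.slice t (some (start + 1)) (some endI)).foldl pvBStep (0, [], rest)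
        let part := PySem.Chars.strip res.2.1
        pvBLoop fuel (if part = [] then res.2.2 else part :: res.2.2)

def is_scalar_type_py_alt (type_name : String) : Bool :=
  pvBLoop (type_name.toList.length + 2) [PySem.Chars.replace type_name.toList [' '] []]

-- ===== PRECONDITION & SPEC =====
def Spec_is_scalar_type_py (type_name : String) (out : Bool) : Prop := out = is_scalar_type_py_alt type_name
instance (type_name : String) (out : Bool) : Decidable (Spec_is_scalar_type_py type_name out) := by unfold Spec_is_scalar_type_py; infer_instance

-- ===== CLAIM (what is proved, stated in full; the proofs are below) =====
def Claim_equal_is_scalar_type_py : Prop := ∀ (type_name : String), Dom_is_scalar_type_py type_name → Spec_is_scalar_type_py type_name (is_scalar_type_py type_name)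

-- ===== LEMMAS AND PROOFS =====

-- ---- normalization: replace(" ", "") is the space filter ----
def pvNF (s : List Char) : List Char := s.filter (· ≠ ' ')

lemma pvReplaceGo_eq_filter (l acc : List Char) (fuel : Nat) (h : l.length ≤ fuel) :
    PySem.Chars.replace.go [' '] [] fuel l acc = acc.reverse ++ pvNF l := by
  induction fuel generalizing l acc with
  | zero =>
    have : l = [] := List.length_eq_zero_iff.mp (Nat.le_zero.mp h)
    subst this; simp [PySem.Chars.replace.go, pvNF]
  | succ f ih =>
    cases l with
    | nil => simp [PySem.Chars.replace.go, pvNF]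
    | cons c t =>
      have hpre : [' '].isPrefixOf (c :: t) = (' ' == c) := by simp [List.isPrefixOf]
      by_cases hc : c = ' '
      · subst hc
        rw [PySem.Chars.replace.go]
        simp only [hpre, beq_self_eq_true, if_true, List.length_singleton,
          List.drop_succ_cons, List.drop_zero, List.reverse_nil, List.nil_append]
        rw [ih t acc (by simpa using Nat.le_of_succ_le_succ h)]
        simp [pvNF]
      · rw [PySem.Chars.replace.go]
        have : (' ' == c) = false := by simp [Ne.symm hc]
        simp only [hpre, this]
        rw [ih t (c :: acc) (by simpa using Nat.le_of_succ_le_succ h)]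
        simp [pvNF, hc]

lemma pvReplace_eq_nf (s : List Char) : PySem.Chars.replace s [' '] [] = pvNF s := by
  rw [PySem.Chars.replace]
  simp [pvReplaceGo_eq_filter s [] s.length (le_refl _)]

lemma pvNF_idem (s : List Char) : pvNF (pvNF s) = pvNF s := by
  simp [pvNF, List.filter_filter]

lemma pvNF_no_space (s : List Char) : ' ' ∉ pvNF s := by simp [pvNF]

lemma pvNF_of_spacefree {s : List Char} (h : ' ' ∉ s) : pvNF s = s :=
  List.filter_eq_self.mpr (fun a ha => by
    simp only [ne_eq, decide_eq_true_eq]; exact fun he => h (he ▸ ha))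

lemma pvNF_length_le (s : List Char) : (pvNF s).length ≤ s.length := by
  simpa [pvNF] using List.length_filter_le _ s

-- ---- find / rfind on one-character needles ----
lemma pvFindGo_singleton (c : Char) (l : List Char) (k : Nat) :
    PySem.Chars.find.go [c] l k =
      if c ∈ l then ((k : Int) + (l.takeWhile (· ≠ c)).length) else -1 := by
  induction l generalizing k with
  | nil => simp [PySem.Chars.find.go]
  | cons x t ih =>
    rw [PySem.Chars.find.go]
    have hpre : [c].isPrefixOf (x :: t) = (c == x) := by simp [List.isPrefixOf]
    by_cases hx : c = x
    · subst hx; simp [hpre, List.takeWhile]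
    · have hb : (c == x) = false := by simp [hx]
      rw [hpre, hb]
      have hxc : x ≠ c := fun h => hx h.symm
      simp only [Bool.false_eq_true, if_false]
      rw [ih (k + 1)]
      simp [List.takeWhile_cons, hxc, hx]
      split_ifs with hmem
      · push_cast; ring
      · rfl

lemma pvFind_singleton (c : Char) (l : List Char) :
    PySem.Chars.find l [c] = if c ∈ l then ((l.takeWhile (· ≠ c)).length : Int) else -1 := by
  rw [PySem.Chars.find, pvFindGo_singleton]; simp

lemma pvFind_ne_neg_one_iff (c : Char) (l : List Char) :
    PySem.Chars.find l [c] ≠ -1 ↔ c ∈ l := by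
  rw [pvFind_singleton]
  by_cases h : c ∈ l <;> simp [h] <;> omega

lemma pvFind_nonneg (c : Char) (l : List Char) (h : PySem.Chars.find l [c] ≠ -1) :
    0 ≤ PySem.Chars.find l [c] := by
  rw [pvFind_singleton] at *
  by_cases hm : c ∈ l <;> simp [hm] at * <;> omega

lemma pvRfindGo_eq_neg_one (c : Char) (s : List Char) (j : Nat) (h : c ∉ s) :
    PySem.Chars.rfind.go s [c] j = -1 := by
  induction j with
  | zero =>
    rw [PySem.Chars.rfind.go]
    cases s with
    | nil => simp
    | cons x t => simp_all [List.isPrefixOf]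
  | succ j ih =>
    rw [PySem.Chars.rfind.go]
    have : [c].isPrefixOf (List.drop (j+1) s) = false := by
      cases hd : List.drop (j+1) s with
      | nil => simp
      | cons x t =>
        have : x ∈ s := List.mem_of_mem_drop (by rw [hd]; exact List.mem_cons_self ..)
        simp [List.isPrefixOf]
        exact fun he => absurd (he ▸ this) h
    simp [this, ih]

lemma pvRfindGo_ne_neg_one (c : Char) (s : List Char) (j : Nat)
    (h : ∃ i ≤ j, [c].isPrefixOf (s.drop i) = true) :
    PySem.Chars.rfind.go s [c] j ≠ -1 := by
  induction j with
  | zero =>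
    obtain ⟨i, hi, hp⟩ := h
    interval_cases i
    rw [PySem.Chars.rfind.go]
    simp at hp
    cases s with
    | nil => simp [List.isPrefixOf] at hp
    | cons x t =>
      simp [List.isPrefixOf] at hp ⊢
      simp [hp]
  | succ j ih =>
    obtain ⟨i, hi, hp⟩ := h
    rw [PySem.Chars.rfind.go]
    by_cases hj : [c].isPrefixOf (List.drop (j + 1) s) = true
    · simp [hj]; omega
    · have hij : i ≤ j := by
        rcases Nat.lt_or_ge i (j+1) with h1 | h1
        · omega
        · exfalso; apply hj; have : i = j + 1 := by omega
          subst this; exact hp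
      simp [hj]
      exact ih ⟨i, hij, hp⟩

lemma pvRfind_eq_neg_one_iff (c : Char) (s : List Char) :
    PySem.Chars.rfind s [c] = -1 ↔ c ∉ s := by
  constructor
  · intro h hc
    obtain ⟨n, hn, hg⟩ := List.mem_iff_getElem.mp hc
    have hne := pvRfindGo_ne_neg_one c s s.length ⟨n, Nat.le_of_lt hn, by
      rw [List.drop_eq_getElem_cons hn, hg]; simp [List.isPrefixOf]⟩
    rw [PySem.Chars.rfind] at h; exact hne h
  · intro h; rw [PySem.Chars.rfind]; exact pvRfindGo_eq_neg_one c s s.length h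

lemma pvRfindGo_dichotomy (c : Char) (s : List Char) (j : Nat) :
    PySem.Chars.rfind.go s [c] j = -1 ∨ 0 ≤ PySem.Chars.rfind.go s [c] j := by
  induction j with
  | zero =>
    rw [PySem.Chars.rfind.go]
    split_ifs
    · right; omega
    · left; rfl
  | succ j ih =>
    rw [PySem.Chars.rfind.go]
    split_ifs
    · right; omega
    · exact ih

lemma pvRfind_nonneg (c : Char) (s : List Char) (h : PySem.Chars.rfind s [c] ≠ -1) :
    0 ≤ PySem.Chars.rfind s [c] := by
  rcases pvRfindGo_dichotomy c s s.length with h1 | h1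
  · exact absurd h1 h
  · exact h1

-- ---- strip and slices ----
lemma pvStrip_sublist (l : List Char) : List.Sublist (PySem.Chars.strip l) l := by
  rw [PySem.Chars.strip, PySem.Chars.rstrip, PySem.Chars.lstrip]
  have h1 : List.Sublist (List.dropWhile PySem.Chars.isspace l) l := List.dropWhile_sublist _
  have h2 : List.Sublist
      (List.dropWhile PySem.Chars.isspace (List.dropWhile PySem.Chars.isspace l).reverse).reverse
      (List.dropWhile PySem.Chars.isspace l) := by
    simpa using (List.dropWhile_sublist (l := (List.dropWhile PySem.Chars.isspace l).reverse)
      (p := PySem.Chars.isspace)).reverse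
  exact h2.trans h1

lemma pvSlice_sublist (t : List Char) (a b : Option Int) :
    List.Sublist (PySem.List.slice t a b) t := by
  simp only [PySem.List.slice]
  exact ((List.take_sublist _ _).trans (List.drop_sublist _ _))

lemma pvSlice_prefix_take (t : List Char) (k : Nat) (hk : k ≤ t.length) :
    PySem.List.slice t none (some (k : Int)) = t.take k := by
  simp only [PySem.List.slice, PySem.List.clampIdx]
  have : ¬ ((k : Int) < 0) := by omega
  simp [this, Int.toNat_natCast, Nat.min_eq_left hk]

lemma pvSlice_empty_of_le (t : List Char) (a b : Int) (hb : 0 ≤ b) (hba : b ≤ a) :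
    PySem.List.slice t (some (a + 1)) (some b) = [] := by
  simp only [PySem.List.slice, PySem.List.clampIdx]
  have h1 : ¬ (a + 1 < 0) := by omega
  have h2 : ¬ (b < 0) := by omega
  simp only [if_neg h1, if_neg h2]
  have : min b.toNat t.length ≤ min (a+1).toNat t.length := by
    have : b.toNat ≤ (a+1).toNat := by omega
    omega
  rw [List.take_eq_nil_iff.mpr]
  omega

lemma pvSlice_length_lt (t : List Char) (a b : Int) (ha : 0 ≤ a) (ht : t ≠ []) :
    (PySem.List.slice t (some (a + 1)) (some b)).length + 1 ≤ t.length := by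
  simp only [PySem.List.slice, PySem.List.clampIdx]
  have h1 : ¬ (a + 1 < 0) := by omega
  have hlen : t.length ≠ 0 := by simpa [List.length_eq_zero_iff] using ht
  have ha1 : 1 ≤ (a+1).toNat := by omega
  simp only [if_neg h1, List.length_take, List.length_drop]
  omega

-- ---- the raw generic type is the prefix before the first '<' ----
lemma pvSplitGo0 (fuel : Nat) (l : List Char) (acc : List (List Char)) :
    PySem.Chars.splitOnMax.go ['<'] fuel 0 l [] acc = (l :: acc).reverse := by
  cases fuel with
  | zero => rw [PySem.Chars.splitOnMax.go]; simp
  | succ f =>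
    cases l with
    | nil => rw [PySem.Chars.splitOnMax.go]; simp; omega
    | cons c t => rw [PySem.Chars.splitOnMax.go]; simp

lemma pvSplitGo1_head (l : List Char) (fuel : Nat) (cur : List Char) (h : l.length ≤ fuel) :
    ∃ rest, PySem.Chars.splitOnMax.go ['<'] fuel 1 l cur [] =
      (cur.reverse ++ l.takeWhile (· ≠ '<')) :: rest := by
  induction l generalizing fuel cur with
  | nil =>
    cases fuel with
    | zero => exact ⟨[], by rw [PySem.Chars.splitOnMax.go]; simp⟩
    | succ f => exact ⟨[], by rw [PySem.Chars.splitOnMax.go]; simp; omega⟩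
  | cons c t ih =>
    cases fuel with
    | zero => simp at h
    | succ f =>
      rw [PySem.Chars.splitOnMax.go]
      by_cases hc : c = '<'
      · subst hc
        have hpre : ['<'].isPrefixOf ('<' :: t) = true := by simp [List.isPrefixOf]
        simp only [hpre, if_true, if_neg (by decide : ¬ (1:Nat) = 0)]
        refine ⟨[t], ?_⟩
        rw [pvSplitGo0]
        simp [List.takeWhile]
      · have hpre : ['<'].isPrefixOf (c :: t) = false := by
          simp [List.isPrefixOf]; exact fun he => absurd he.symm hc
        simp only [hpre, if_neg (by decide : ¬ (1:Nat) = 0), Bool.false_eq_true, if_false]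
        obtain ⟨rest, hr⟩ := ih f (c :: cur) (by simpa using h)
        refine ⟨rest, ?_⟩
        rw [hr]
        simp [List.takeWhile_cons, hc]

lemma pvRaw_eq_takeWhile (t : List Char) : pvRawGenericType t = t.takeWhile (· ≠ '<') := by
  rw [pvRawGenericType, PySem.Chars.splitOnMax]
  rw [if_neg (by omega)]
  obtain ⟨rest, hr⟩ := pvSplitGo1_head t (t.length + 1) [] (by omega)
  norm_num at hr ⊢
  rw [hr]
  simp [PySem.List.pyGetD_zero_cons]

-- B's head slice t[:start] equals A's raw generic type on the same string
lemma pvHead_eq_raw (t : List Char) (h : '<' ∈ t) :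
    PySem.List.slice t none (some (PySem.Chars.find t ['<'])) = pvRawGenericType t := by
  rw [pvRaw_eq_takeWhile, pvFind_singleton, if_pos h]
  rw [pvSlice_prefix_take t _ (by simpa using (List.takeWhile_prefix _).length_le)]
  exact (List.prefix_iff_eq_take.mp (List.takeWhile_prefix _)).symm

-- ---- the two comma-splitting folds ----
def pvFinalize (res : Int × List Char × List (List Char)) : List (List Char) :=
  let value := PySem.Chars.strip res.2.1
  if value = [] then res.2.2 else res.2.2 ++ [value]

def pvMu (L : List (List Char)) : Nat := (L.map (fun a => a.length + 1)).sum

lemma pvFoldA_args_append' (body : List Char) (d : Int) (cur : List Char)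
    (a1 a2 : List (List Char)) :
    body.foldl pvAStep (d, cur, a1 ++ a2) =
      ((body.foldl pvAStep (d, cur, a2)).1, (body.foldl pvAStep (d, cur, a2)).2.1,
        a1 ++ (body.foldl pvAStep (d, cur, a2)).2.2) := by
  induction body generalizing d cur a2 with
  | nil => simp
  | cons c t ih =>
    simp only [List.foldl_cons]
    by_cases hc : c = ',' ∧ d = 0
    · simp only [pvAStep, if_pos hc]
      by_cases hv : PySem.Chars.strip cur = []
      · simp only [hv, if_pos]
        exact ih d [] a2
      · simp only [hv, if_false, List.append_assoc]
        exact ih d [] (a2 ++ [PySem.Chars.strip cur])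
    · simp only [pvAStep, if_neg hc]
      exact ih _ _ a2

lemma pvFoldA_args_append (body : List Char) (d : Int) (cur : List Char) (args : List (List Char)) :
    body.foldl pvAStep (d, cur, args) =
      ((body.foldl pvAStep (d, cur, [])).1, (body.foldl pvAStep (d, cur, [])).2.1,
        args ++ (body.foldl pvAStep (d, cur, [])).2.2) := by
  simpa using pvFoldA_args_append' body d cur args []

lemma pvFoldB_eq (body : List Char) (d : Int) (cur : List Char) (pend : List (List Char)) :
    body.foldl pvBStep (d, cur, pend) =
      ((body.foldl pvAStep (d, cur, [])).1, (body.foldl pvAStep (d, cur, [])).2.1,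
        (body.foldl pvAStep (d, cur, [])).2.2.reverse ++ pend) := by
  induction body generalizing d cur pend with
  | nil => simp
  | cons c t ih =>
    simp only [List.foldl_cons]
    by_cases hc : c = ',' ∧ d = 0
    · simp only [pvAStep, pvBStep, if_pos hc]
      by_cases hv : PySem.Chars.strip cur = []
      · simp only [hv, if_pos]
        exact ih d [] pend
      · simp only [hv, if_false, List.nil_append]
        rw [ih d [] (PySem.Chars.strip cur :: pend),
          pvFoldA_args_append t d [] [PySem.Chars.strip cur]]
        simp
    · simp only [pvAStep, pvBStep, if_neg hc]
      exact ih _ _ pend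

lemma pvFold_mu (body : List Char) (d : Int) (cur : List Char) (args : List (List Char)) :
    pvMu (pvFinalize (body.foldl pvAStep (d, cur, args))) ≤
      pvMu args + cur.length + body.length + 1 := by
  induction body generalizing d cur args with
  | nil =>
    simp only [List.foldl_nil, pvFinalize]
    by_cases hv : PySem.Chars.strip cur = []
    · simp [hv, pvMu]; omega
    · have := (pvStrip_sublist cur).length_le
      simp [hv, pvMu]
      omega
  | cons c t ih =>
    simp only [List.foldl_cons]
    by_cases hc : c = ',' ∧ d = 0
    · simp only [pvAStep, if_pos hc]
      by_cases hv : PySem.Chars.strip cur = []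
      · simp only [hv, if_pos]
        refine le_trans (ih d [] args) ?_
        simp; omega
      · simp only [hv, if_false]
        have hlen := (pvStrip_sublist cur).length_le
        refine le_trans (ih d [] (args ++ [PySem.Chars.strip cur])) ?_
        simp [pvMu]
        omega
    · simp only [pvAStep, if_neg hc]
      refine le_trans (ih _ (cur ++ [c]) args) ?_
      simp
      omega

lemma pvFold_mem (body : List Char) (d : Int) (cur : List Char) (args : List (List Char))
    (a : List Char) (ha : a ∈ pvFinalize (body.foldl pvAStep (d, cur, args))) :
    a ∈ args ∨ List.Sublist a (cur ++ body) := by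
  induction body generalizing d cur args with
  | nil =>
    simp only [List.foldl_nil, pvFinalize] at ha
    by_cases hv : PySem.Chars.strip cur = []
    · simp [hv] at ha; exact Or.inl ha
    · simp [hv] at ha
      rcases ha with ha | ha
      · exact Or.inl ha
      · subst ha; exact Or.inr (by simpa using pvStrip_sublist cur)
  | cons c t ih =>
    simp only [List.foldl_cons] at ha
    by_cases hc : c = ',' ∧ d = 0
    · simp only [pvAStep, if_pos hc] at ha
      rcases ih _ _ _ ha with h | h
      · by_cases hv : PySem.Chars.strip cur = []
        · simp [hv] at h; exact Or.inl h
        · simp [hv] at h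
          rcases h with h | h
          · exact Or.inl h
          · subst h
            refine Or.inr (List.Sublist.trans ?_ (List.sublist_append_left cur (c :: t)))
            exact pvStrip_sublist cur
      · refine Or.inr (List.Sublist.trans (by simpa using h) ?_)
        refine List.Sublist.trans (List.sublist_cons_self c t) ?_
        exact List.sublist_append_right cur (c :: t)
    · simp only [pvAStep, if_neg hc] at ha
      rcases ih _ _ _ ha with h | h
      · exact Or.inl h
      · exact Or.inr (by simpa [List.append_assoc] using h)

-- ---- _generic_arguments via the fold ----
lemma pvGenArgs_eq_finalize (t : List Char) (h1 : '<' ∈ t) (h2 : '>' ∈ t) :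
    pvGenericArguments t =
      pvFinalize ((PySem.List.slice t (some (PySem.Chars.find t ['<'] + 1))
        (some (PySem.Chars.rfind t ['>']))).foldl pvAStep (0, [], [])) := by
  have hf : PySem.Chars.find t ['<'] ≠ -1 := (pvFind_ne_neg_one_iff _ _).mpr h1
  have hr : PySem.Chars.rfind t ['>'] ≠ -1 := fun h => ((pvRfind_eq_neg_one_iff _ _).mp h) h2
  rw [pvGenericArguments]
  by_cases hle : PySem.Chars.rfind t ['>'] ≤ PySem.Chars.find t ['<']
  · rw [if_pos (Or.inr (Or.inr hle))]
    rw [pvSlice_empty_of_le t _ _ (pvRfind_nonneg _ _ hr) hle]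
    simp [pvFinalize, PySem.Chars.strip, PySem.Chars.lstrip, PySem.Chars.rstrip]
  · rw [if_neg (by push_neg; exact ⟨hf, hr, by omega⟩)]
    rfl

lemma pvGenArgs_mem (t : List Char) (a : List Char) (ha : a ∈ pvGenericArguments t) :
    List.Sublist a t ∧ a.length + 1 ≤ t.length := by
  rw [pvGenericArguments] at ha
  by_cases hg : PySem.Chars.find t ['<'] = -1 ∨ PySem.Chars.rfind t ['>'] = -1 ∨
      PySem.Chars.rfind t ['>'] ≤ PySem.Chars.find t ['<']
  · rw [if_pos hg] at ha; simp at ha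
  · rw [if_neg hg] at ha
    push_neg at hg
    have hmem : '<' ∈ t := (pvFind_ne_neg_one_iff _ _).mp hg.1
    have ht : t ≠ [] := fun h => by simp [h] at hmem
    have hstart : 0 ≤ PySem.Chars.find t ['<'] := pvFind_nonneg _ _ hg.1
    have hb := pvFold_mem _ _ _ _ _ ha
    rcases hb with hb | hb
    · simp at hb
    · have hsub : List.Sublist a
          (PySem.List.slice t (some (PySem.Chars.find t ['<'] + 1))
            (some (PySem.Chars.rfind t ['>']))) := by simpa using hb
      have hlt := pvSlice_length_lt t (PySem.Chars.find t ['<']) (PySem.Chars.rfind t ['>'])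
        hstart ht
      exact ⟨hsub.trans (pvSlice_sublist _ _ _), by
        have := hsub.length_le; omega⟩

lemma pvGenArgs_mu (t : List Char) (h1 : '<' ∈ t) (h2 : '>' ∈ t) :
    pvMu (pvGenericArguments t) ≤ t.length := by
  rw [pvGenArgs_eq_finalize t h1 h2]
  have ht : t ≠ [] := fun h => by simp [h] at h1
  have hstart : 0 ≤ PySem.Chars.find t ['<'] :=
    pvFind_nonneg _ _ ((pvFind_ne_neg_one_iff _ _).mpr h1)
  have hlt := pvSlice_length_lt t (PySem.Chars.find t ['<']) (PySem.Chars.rfind t ['>'])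
    hstart ht
  have := pvFold_mu (PySem.List.slice t (some (PySem.Chars.find t ['<'] + 1))
    (some (PySem.Chars.rfind t ['>']))) 0 [] []
  simp [pvMu] at this ⊢
  omega

-- ---- fuel facts for A ----
lemma pvAGo_nf (f : Nat) (t : List Char) : pvAGo f t = pvAGo f (pvNF t) := by
  cases f with
  | zero => rfl
  | succ f => simp only [pvAGo, pvReplace_eq_nf, pvNF_idem]

lemma pvAll_congr {l : List (List Char)} {p q : List Char → Bool}
    (h : ∀ x ∈ l, p x = q x) : l.all p = l.all q := by
  induction l with
  | nil => rfl
  | cons x t ih =>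
    simp only [List.all_cons, h x (List.mem_cons_self ..),
      ih (fun y hy => h y (List.mem_cons_of_mem _ hy))]

lemma pvAGo_fuel_irrel (n : Nat) (f g : Nat) (t : List Char)
    (hn : (pvNF t).length ≤ n) (hf : n < f) (hg : n < g) : pvAGo f t = pvAGo g t := by
  induction n using Nat.strong_induction_on generalizing f g t with
  | _ n ih =>
    obtain ⟨f, rfl⟩ : ∃ f', f = f' + 1 := ⟨f - 1, by omega⟩
    obtain ⟨g, rfl⟩ : ∃ g', g = g' + 1 := ⟨g - 1, by omega⟩
    simp only [pvAGo, pvReplace_eq_nf]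
    by_cases hp : pvNF t ∈ pvPrimitives
    · simp [hp]
    · simp only [hp, if_false]
      by_cases hlt : PySem.Chars.isIn ['<'] (pvNF t) && PySem.Chars.isIn ['>'] (pvNF t)
      · simp only [hlt, if_true]
        congr 1
        have hmem : '<' ∈ pvNF t := by
          have := (Bool.and_eq_true _ _).mp hlt |>.1
          rw [PySem.Chars.isIn] at this
          exact (pvFind_ne_neg_one_iff _ _).mp (by simpa using this)
        have hlen1 : 1 ≤ (pvNF t).length := by
          cases hnf : pvNF t with
          | nil => rw [hnf] at hmem; simp at hmem
          | cons x xs => simp [hnf]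
        apply pvAll_congr
        intro a hamem
        have hb := pvGenArgs_mem (pvNF t) a hamem
        have hsf : ' ' ∉ a := fun hs => pvNF_no_space t (hb.1.mem hs)
        have hlena : (pvNF a).length ≤ n - 1 := by
          rw [pvNF_of_spacefree hsf]; omega
        exact ih (n - 1) (by omega) f g a hlena (by omega) (by omega)
      · simp [hlt]

-- ---- B's worklist computes the conjunction of A over the stack ----
lemma pvBLoop_eq_all (f : Nat) (pending : List (List Char)) (hmu : pvMu pending < f)
    (hsf : ∀ t ∈ pending, ' ' ∉ t) :
    pvBLoop f pending = pending.all (fun t => pvAGo (t.length + 1) t) := by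
  induction f generalizing pending with
  | zero => exact absurd hmu (Nat.not_lt_zero _)
  | succ f ih =>
    cases pending with
    | nil => simp [pvBLoop]
    | cons t rest =>
      have hsft : ' ' ∉ t := hsf t (List.mem_cons_self ..)
      have hnf : pvNF t = t := pvNF_of_spacefree hsft
      have hmut : pvMu (t :: rest) = t.length + 1 + pvMu rest := by simp [pvMu]
      rw [pvBLoop]
      simp only [List.all_cons]
      by_cases hp : t ∈ pvPrimitives
      · rw [if_pos hp]
        have hA : pvAGo (t.length + 1) t = true := by
          simp [pvAGo, pvReplace_eq_nf, hnf, hp]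
        rw [hA, ih rest (by omega) (fun x hx => hsf x (List.mem_cons_of_mem _ hx))]
        simp
      · rw [if_neg hp]
        have hAgo : pvAGo (t.length + 1) t =
            (if PySem.Chars.isIn ['<'] t && PySem.Chars.isIn ['>'] t then
              decide (pvRawGenericType t ∈ pvContainers) &&
                (pvGenericArguments t).all (pvAGo t.length)
            else false) := by
          simp [pvAGo, pvReplace_eq_nf, hnf, hp]
        by_cases hg : PySem.Chars.find t ['<'] = -1 ∨ PySem.Chars.rfind t ['>'] = -1
        · rw [if_pos (by tauto)]
          have : (PySem.Chars.isIn ['<'] t && PySem.Chars.isIn ['>'] t) = false := by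
            rcases hg with hg | hg
            · have : '<' ∉ t := fun hm => ((pvFind_ne_neg_one_iff '<' t).mpr hm) hg
              simp [PySem.Chars.isIn, pvFind_singleton, this]
            · have : '>' ∉ t := (pvRfind_eq_neg_one_iff '>' t).mp hg
              simp [PySem.Chars.isIn, pvFind_singleton, this]
          rw [hAgo, this]
          simp
        · push_neg at hg
          have hm1 : '<' ∈ t := (pvFind_ne_neg_one_iff _ _).mp hg.1
          have hm2 : '>' ∈ t := by
            by_contra hn2
            exact hg.2 ((pvRfind_eq_neg_one_iff '>' t).mpr hn2)
          have hisin : (PySem.Chars.isIn ['<'] t && PySem.Chars.isIn ['>'] t) = true := by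
            have r1 := (pvFind_ne_neg_one_iff '<' t).mpr hm1
            have r2 : PySem.Chars.find t ['>'] ≠ -1 := (pvFind_ne_neg_one_iff '>' t).mpr hm2
            simp [PySem.Chars.isIn, bne, r1, r2]
          have hhead := pvHead_eq_raw t hm1
          by_cases hcont : pvRawGenericType t ∈ pvContainers
          · rw [if_neg (by rw [hhead]; push_neg; exact ⟨hg.1, hg.2, hcont⟩)]
            -- rewrite B's new stack via the fold correspondence
            rw [pvFoldB_eq]
            dsimp only
            set F := List.foldl pvAStep (0, ([] : List Char), ([] : List (List Char)))
              (PySem.List.slice t (some (PySem.Chars.find t ['<'] + 1))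
                (some (PySem.Chars.rfind t ['>']))) with hF
            have hgen : pvGenericArguments t = pvFinalize F := by
              rw [pvGenArgs_eq_finalize t hm1 hm2, hF]
            have hmem_prop : ∀ a ∈ pvGenericArguments t, ' ' ∉ a ∧ a.length + 1 ≤ t.length :=
              fun a ha =>
                ⟨fun hs => hsft ((pvGenArgs_mem t a ha).1.mem hs), (pvGenArgs_mem t a ha).2⟩
            have hmunew : pvMu ((pvGenericArguments t).reverse ++ rest) < f := by
              have := pvGenArgs_mu t hm1 hm2
              simp only [pvMu, List.map_append, List.map_reverse, List.sum_append,
                List.sum_reverse] at *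
              omega
            have hmain : pvBLoop f ((pvGenericArguments t).reverse ++ rest) =
                (pvAGo (t.length + 1) t && rest.all fun t => pvAGo (t.length + 1) t) := by
              rw [ih _ hmunew (by
                intro x hx
                rcases List.mem_append.mp hx with hx | hx
                · exact (hmem_prop x (List.mem_reverse.mp hx)).1
                · exact hsf x (List.mem_cons_of_mem _ hx))]
              rw [hAgo, if_pos hisin, decide_eq_true hcont]
              simp only [List.all_append, List.all_reverse, Bool.true_and]
              congr 1
              apply pvAll_congr
              intro a ha
              have hb := hmem_prop a ha
              have hlena : (pvNF a).length ≤ a.length := pvNF_length_le a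
              exact pvAGo_fuel_irrel a.length (a.length + 1) t.length a hlena (by omega)
                (by omega)
            split_ifs with hv
            · have hX : F.2.2.reverse ++ rest = (pvGenericArguments t).reverse ++ rest := by
                rw [hgen, pvFinalize]; simp [hv]
              rw [hX]; exact hmain
            · have hX : PySem.Chars.strip F.2.1 :: (F.2.2.reverse ++ rest) =
                  (pvGenericArguments t).reverse ++ rest := by
                rw [hgen, pvFinalize]; simp [hv]
              rw [hX]; exact hmain
          · rw [if_pos (Or.inr (Or.inr (by rw [hhead]; exact hcont)))]
            rw [hAgo, if_pos hisin]
            simp [hcont]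

-- ===== VERDICT (by name: the statement is the Claim_ definition above) =====
theorem is_scalar_type_py_spec : Claim_equal_is_scalar_type_py := by
  intro s _
  unfold Spec_is_scalar_type_py is_scalar_type_py is_scalar_type_py_alt
  rw [pvReplace_eq_nf]
  rw [pvBLoop_eq_all (s.toList.length + 2) [pvNF s.toList]
    (by have h := pvNF_length_le s.toList; simp only [pvMu, List.map_cons, List.map_nil,
      List.sum_cons, List.sum_nil] at *; omega)
    (by intro x hx; simp at hx; subst hx; exact pvNF_no_space _)]
  simp only [List.all_cons, List.all_nil, Bool.and_true]
  rw [pvAGo_nf (s.toList.length + 1) s.toList]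
  exact pvAGo_fuel_irrel (pvNF s.toList).length _ _ (pvNF s.toList)
    (by rw [pvNF_idem]) (by have := pvNF_length_le s.toList; omega) (by omega)
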